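-- pv_equiv track=rewrite | github.com/xizhang77/CodingInterview | Python/15-Number-Of-1-In-Binary.py | hammingWeight
-- ===== SOURCE A (Python) =====
-- def hammingWeight(n):
--     """
--     :type n: int
--     :rtype: int
--     """
--     count = 0
--     flag = 1
--
--     for i in range(32):
--         if n & flag:
--             count += 1
--         flag <<= 1
--
--     return count
-- ===== SOURCE B (Python) =====
-- def hammingWeight(n):
--     n &= 0xFFFFFFFF
--     count = 0
--     while n:
--         n &= n - 1
--         count += 1
--     return count
-- ===== Notes on version B (the rewrite author's own statement) =====
-- stated objective: idiomatic
-- what changed: Replaces the fixed 32-iteration flag-shifting scan with Brian Kernighan's loop that clears the lowest set bit once per set bit (after masking to the low 32 bits).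
import Mathlib
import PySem

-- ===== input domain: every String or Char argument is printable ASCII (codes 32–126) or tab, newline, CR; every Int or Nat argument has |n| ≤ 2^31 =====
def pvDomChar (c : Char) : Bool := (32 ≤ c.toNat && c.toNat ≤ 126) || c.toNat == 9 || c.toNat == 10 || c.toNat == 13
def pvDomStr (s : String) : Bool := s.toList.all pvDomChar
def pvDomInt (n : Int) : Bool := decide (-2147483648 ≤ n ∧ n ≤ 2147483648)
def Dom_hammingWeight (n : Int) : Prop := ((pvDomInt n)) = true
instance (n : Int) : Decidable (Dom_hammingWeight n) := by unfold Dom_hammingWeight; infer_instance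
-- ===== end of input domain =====

-- B replaces A's fixed 32-iteration flag-shifting scan by Brian Kernighan's loop
-- (mask to the low 32 bits, then clear the lowest set bit once per set bit): idiomatic, not claimed faster.

-- ===== PORT A =====
-- literal port: count = 0; flag = 1; for i in range(32): if n & flag: count += 1; flag <<= 1
def hammingWeight (n : Int) : Int :=
  ((PySem.List.pyRange 0 32 1).foldl
    (fun (st : Int × Int) _i =>
      ((if PySem.Int.band n st.2 ≠ 0 then st.1 + 1 else st.1), st.2 <<< (1 : Nat)))
    (0, 1)).1

-- ===== PORT B =====
-- the while loop of Source B: state (n, count); masked value is nonnegative, carried as a Nat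
def kern (m : Nat) (count : Int) : Int :=
  if h : m = 0 then count else kern (m &&& (m - 1)) (count + 1)
  termination_by m
  decreasing_by exact Nat.lt_of_le_of_lt Nat.and_le_right (by omega)

def hammingWeight_alt (n : Int) : Int :=
  kern (PySem.Int.band n 4294967295).toNat 0

-- ===== PRECONDITION & SPEC =====
def Spec_hammingWeight (n : Int) (out : Int) : Prop := out = hammingWeight_alt n
instance (n : Int) (out : Int) : Decidable (Spec_hammingWeight n out) := by unfold Spec_hammingWeight; infer_instance

-- ===== CLAIM (what is proved, stated in full; the proofs are below) =====
def Claim_equal_hammingWeight : Prop := ∀ (n : Int), Dom_hammingWeight n → Spec_hammingWeight n (hammingWeight n)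

-- ===== LEMMAS AND PROOFS =====

-- reference population count
def popc (m : Nat) : Nat :=
  if h : m = 0 then 0 else popc (m / 2) + m % 2
  termination_by m
  decreasing_by omega

theorem popc_step (m : Nat) : popc m = popc (m / 2) + m % 2 := by
  by_cases h : m = 0
  · subst h; simp [popc]
  · rw [popc]; simp [h]

-- Kernighan step, odd case: m & (m-1) drops the low bit
theorem land_pred_odd (m : Nat) (h : m % 2 = 1) : m &&& (m - 1) = m - 1 := by
  apply Nat.eq_of_testBit_eq
  intro i
  rw [Nat.testBit_land]
  cases i with
  | zero => simp [Nat.testBit_zero, h]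
  | succ i =>
    rw [Nat.testBit_succ, Nat.testBit_succ, show (m - 1) / 2 = m / 2 by omega, Bool.and_self]

-- Kernighan step, even case
theorem land_pred_even (m : Nat) (h0 : 0 < m) (h : m % 2 = 0) :
    m &&& (m - 1) = 2 * ((m / 2) &&& (m / 2 - 1)) := by
  apply Nat.eq_of_testBit_eq
  intro i
  rw [Nat.testBit_land]
  cases i with
  | zero => simp [Nat.testBit_zero, h, Nat.mul_mod_right]
  | succ i =>
    rw [Nat.testBit_succ, Nat.testBit_succ, Nat.testBit_succ,
      Nat.mul_div_cancel_left _ (by omega : 0 < 2), Nat.testBit_land,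
      show (m - 1) / 2 = m / 2 - 1 by omega]

theorem kern_pos (m : Nat) (c : Int) (h : m ≠ 0) :
    kern m c = kern (m &&& (m - 1)) (c + 1) := by
  conv_lhs => rw [kern]
  simp [h]

theorem kern_two_mul (k : Nat) : ∀ c, kern (2 * k) c = kern k c := by
  induction k using Nat.strong_induction_on with
  | _ k ih =>
    intro c
    by_cases h0 : k = 0
    · subst h0; rfl
    · rw [kern_pos (2 * k) c (by omega), kern_pos k c h0,
        land_pred_even (2 * k) (by omega) (by omega),
        Nat.mul_div_cancel_left _ (by omega : 0 < 2)]
      exact ih (k &&& (k - 1)) (Nat.lt_of_le_of_lt Nat.and_le_right (by omega)) _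

theorem kern_eq_popc (m : Nat) : ∀ c, kern m c = c + (popc m : Int) := by
  induction m using Nat.strong_induction_on with
  | _ m ih =>
    intro c
    by_cases h0 : m = 0
    · subst h0; simp [kern, popc]
    · by_cases hp : m % 2 = 1
      · rw [kern_pos m c h0, land_pred_odd m hp, ih (m - 1) (by omega) (c + 1)]
        have h1 : popc m = popc (m / 2) + 1 := by rw [popc_step, hp]
        have h2 : popc (m - 1) = popc (m / 2) := by
          rw [popc_step (m - 1)]
          have : (m - 1) / 2 = m / 2 := by omega
          rw [this]
          omega
        rw [h1, h2]; push_cast; ring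
      · have hk : m = 2 * (m / 2) := by omega
        rw [hk, kern_two_mul, ih (m / 2) (by omega) c]
        have : popc (2 * (m / 2)) = popc (m / 2) := by
          rw [popc_step (2 * (m / 2))]
          simp [Nat.mul_div_cancel_left _ (by omega : 0 < 2)]
        rw [this]

-- popc counts the testBits below any bound
theorem popc_eq_countP (k : Nat) : ∀ m, m < 2 ^ k →
    popc m = (List.range k).countP (fun j => m.testBit j) := by
  induction k with
  | zero => intro m hm; interval_cases m; simp [popc]
  | succ k ih =>
    intro m hm
    rw [List.range_succ_eq_map, List.countP_cons, List.countP_map]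
    have hh : ((fun j => m.testBit j) ∘ Nat.succ) = fun j => (m / 2).testBit j := by
      funext j; simp [Function.comp, Nat.testBit_succ]
    have hm2 : m / 2 < 2 ^ k := by
      have : 2 ^ (k + 1) = 2 * 2 ^ k := by ring
      omega
    rw [hh, ← ih (m / 2) hm2]
    rw [popc_step m]
    rcases Nat.even_or_odd m with he | ho
    · simp [Nat.testBit_zero, Nat.even_iff.mp he]
    · simp [Nat.testBit_zero, Nat.odd_iff.mp ho]

-- the masked Nat value of B
theorem masked_lt (n : Int) : (PySem.Int.band n 4294967295).toNat < 2 ^ 32 := by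
  by_cases hn : (0 : Int) ≤ n
  · rw [PySem.Int.band_of_nonneg hn (by norm_num)]
    have h1 : n.toNat &&& (4294967295 : Int).toNat ≤ (4294967295 : Int).toNat :=
      Nat.and_le_right
    have h2 : ((4294967295 : Int)).toNat = 4294967295 := by decide
    rw [Int.toNat_natCast]
    omega
  · rw [PySem.Int.band]
    simp only [hn, if_false, show (0:Int) ≤ 4294967295 by norm_num, if_true]
    rw [Int.toNat_natCast]
    have h1 : (4294967295 : Int).toNat - ((4294967295 : Int).toNat &&& (-n - 1).toNat)
        ≤ (4294967295 : Int).toNat := Nat.sub_le _ _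
    have h2 : ((4294967295 : Int)).toNat = 4294967295 := by decide
    omega

-- bridge: A's bit test at position j (j < 32) is exactly a testBit of B's masked Nat
theorem band_pow_ne_zero_iff (n : Int) (j : Nat) (hj : j < 32) :
    (PySem.Int.band n (2 ^ j) ≠ 0) ↔
      ((PySem.Int.band n 4294967295).toNat.testBit j = true) := by
  have hmask : (4294967295 : Int).toNat = 2 ^ 32 - 1 := by decide
  have hpowc : ((2 : Int) ^ j) = (((2 ^ j : Nat) : Int)) := by push_cast; ring
  by_cases hn : (0 : Int) ≤ n
  · rw [hpowc, PySem.Int.band_of_nonneg hn (by positivity),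
      PySem.Int.band_of_nonneg hn (by norm_num)]
    simp only [Int.toNat_natCast, hmask]
    rw [Nat.and_two_pow, Nat.and_two_pow_sub_one_eq_mod, Nat.testBit_mod_two_pow]
    simp only [hj, decide_true, Bool.true_and]
    cases n.toNat.testBit j <;> simp
  · rw [hpowc, PySem.Int.band, PySem.Int.band]
    simp only [hn, if_false, show (0:Int) ≤ ((2 ^ j : Nat) : Int) by positivity,
      show (0:Int) ≤ 4294967295 by norm_num, if_true]
    simp only [Int.toNat_natCast, hmask]
    set k := (-n - 1).toNat with hk
    have hknn : 0 ≤ (-n - 1) := by omega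
    rw [Nat.and_comm (2 ^ j) k, Nat.and_two_pow,
      Nat.and_comm (2 ^ 32 - 1) k, Nat.and_two_pow_sub_one_eq_mod]
    have hlt : k % 2 ^ 32 < 2 ^ 32 := Nat.mod_lt _ (by norm_num)
    have hsub : 2 ^ 32 - 1 - k % 2 ^ 32 = 2 ^ 32 - (k % 2 ^ 32 + 1) := by omega
    rw [hsub, Nat.testBit_two_pow_sub_succ hlt, Nat.testBit_mod_two_pow]
    simp only [hj, decide_true, Bool.true_and]
    cases k.testBit j <;> simp

-- A's fold characterised
theorem foldA (n : Int) (l : List Int) : ∀ (c : Int) (i : Nat),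
    (l.foldl
      (fun (st : Int × Int) _i =>
        ((if PySem.Int.band n st.2 ≠ 0 then st.1 + 1 else st.1), st.2 <<< (1 : Nat)))
      (c, 2 ^ i)).1
    = c + ((List.range l.length).countP (fun j => decide (PySem.Int.band n (2 ^ (i + j)) ≠ 0)) : Int) := by
  induction l with
  | nil => intro c i; simp
  | cons x t ih =>
    intro c i
    simp only [List.foldl_cons, List.length_cons]
    have hs : (2 ^ i : Int) <<< (1 : Nat) = 2 ^ (i + 1) := by
      rw [Int.shiftLeft_eq]; ring
    rw [hs, ih _ (i + 1)]
    rw [List.range_succ_eq_map, List.countP_cons, List.countP_map]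
    have hh : ((fun j => decide (PySem.Int.band n (2 ^ (i + j)) ≠ 0)) ∘ Nat.succ)
        = fun j => decide (PySem.Int.band n (2 ^ (i + 1 + j)) ≠ 0) := by
      funext j; simp only [Function.comp]
      have : i + (j + 1) = i + 1 + j := by omega
      rw [this]
    rw [hh]
    by_cases hb : PySem.Int.band n (2 ^ (i + 0)) ≠ 0
    · simp only [Nat.add_zero] at hb
      simp [hb]
      ring
    · simp only [Nat.add_zero] at hb
      simp [hb]

theorem hammingWeight_eq (n : Int) : hammingWeight n = hammingWeight_alt n := by
  have hA : hammingWeight n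
      = ((List.range 32).countP (fun j => decide (PySem.Int.band n (2 ^ j) ≠ 0)) : Int) := by
    unfold hammingWeight
    have h32 : PySem.List.pyRange 0 32 1 = (List.range 32).map (fun k => (k : Int)) := by decide
    rw [h32]
    have := foldA n ((List.range 32).map (fun k => (k : Int))) 0 0
    simp only [pow_zero] at this
    rw [this]
    simp
  have hB : hammingWeight_alt n
      = ((List.range 32).countP (fun j => (PySem.Int.band n 4294967295).toNat.testBit j) : Int) := by
    unfold hammingWeight_alt
    rw [kern_eq_popc, popc_eq_countP 32 _ (masked_lt n)]
    simp
  rw [hA, hB]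
  congr 1
  apply List.countP_congr
  intro j hj
  have hj32 : j < 32 := List.mem_range.mp hj
  simp only [decide_eq_true_eq]
  exact band_pow_ne_zero_iff n j hj32

-- ===== VERDICT (by name: the statement is the Claim_ definition above) =====
theorem hammingWeight_spec : Claim_equal_hammingWeight := by
  intro n _
  unfold Spec_hammingWeight
  exact hammingWeight_eq n
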